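-- pv_equiv track=rewrite | github.com/ogilg/Preferences | src/measurement_storage/run_parsing.py | extract_template_from_run_dir
-- ===== SOURCE A (Python) =====
-- MODEL_PREFIXES = ("qwen3", "llama", "gemma", "claude", "gpt")
--
-- def extract_template_from_run_dir(dir_name: str) -> str | None:
--     """Extract template name from run directory name.
--
--     Format: {template}_{model}_{format}_cseed{n}_rseed{n}
--     e.g. 'ban_four_1_5_claude-haiku-4.5_regex_cseed0_rseed0' -> 'ban_four_1_5'
--     """
--     parts = dir_name.split("_")
--     for i, part in enumerate(parts):
--         if part == "regex":
--             for j in range(1, i):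
--                 candidate = "_".join(parts[j:i])
--                 if any(candidate.startswith(m) for m in MODEL_PREFIXES):
--                     return "_".join(parts[:j])
--     return None
-- ===== SOURCE B (Python) =====
-- MODEL_PREFIXES = ("qwen3", "llama", "gemma", "claude", "gpt")
--
-- def extract_template_from_run_dir(dir_name: str) -> str | None:
--     """Single forward pass: j0 = first index >= 1 whose token starts with a model
--     prefix (prefixes contain no '_', so joined candidates start with a prefix iff
--     their first token does); answer iff a 'regex' token occurs strictly after j0."""
--     parts = dir_name.split("_")
--     j0 = next((j for j in range(1, len(parts))
--                if parts[j].startswith(MODEL_PREFIXES)), None)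
--     if j0 is None:
--         return None
--     return "_".join(parts[:j0]) if "regex" in parts[j0 + 1:] else None
-- ===== Notes on version B (the rewrite author's own statement) =====
-- stated objective: simpler
-- what changed: Replaces A's nested loops (for each regex-marker token, re-join and prefix-test every slice parts[j:i]) with one linear scan for the first token starting with a model prefix plus a membership test for a later marker token; correct because the prefixes contain no underscore, so a joined slice starts with a prefix iff its first token does.
import Mathlib
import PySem

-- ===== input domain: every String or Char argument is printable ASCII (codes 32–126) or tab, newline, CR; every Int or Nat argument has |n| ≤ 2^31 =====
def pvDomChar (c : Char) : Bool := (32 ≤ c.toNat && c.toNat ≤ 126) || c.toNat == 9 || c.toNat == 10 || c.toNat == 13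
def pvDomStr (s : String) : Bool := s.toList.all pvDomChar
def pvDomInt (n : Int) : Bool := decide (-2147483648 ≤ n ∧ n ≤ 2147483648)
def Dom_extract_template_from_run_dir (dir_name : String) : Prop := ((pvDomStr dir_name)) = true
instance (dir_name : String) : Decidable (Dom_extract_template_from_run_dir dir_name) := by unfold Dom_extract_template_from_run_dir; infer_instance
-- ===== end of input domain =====

-- B replaces A's nested regex-scan/join-slice loops with one linear scan for the first
-- prefixed token plus a membership test for a later 'regex' token (same return value).


-- ===== PORT A =====
def MODEL_PREFIXES : List String := ["qwen3", "llama", "gemma", "claude", "gpt"]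

-- A's inner loop body: 'candidate = "_".join(parts[j:i]); if any(candidate.startswith(m) for m in MODEL_PREFIXES): return "_".join(parts[:j])'
def pvAbody (parts : List String) (i j : Int) : Option String :=
  let candidate := PySem.Str.join "_" (PySem.List.slice parts (some j) (some i))
  if MODEL_PREFIXES.any (fun m => PySem.Str.startswith candidate m) then
    some (PySem.Str.join "_" (PySem.List.slice parts none (some j)))
  else none

-- A's inner loop: 'for j in range(1, i): …'
def pvAinner (parts : List String) (i : Int) : Option String :=
  (PySem.List.pyRange 1 i 1).findSome? (pvAbody parts i)

def extract_template_from_run_dir (dir_name : String) : Option String :=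
  -- sep "_" is non-empty, so Python's split never raises: split? is always `some`
  let parts := (PySem.Str.split? dir_name "_").getD []
  (PySem.List.enumerate parts).findSome? (fun ip =>
    if ip.2 == "regex" then pvAinner parts ip.1 else none)

-- ===== PORT B =====
def extract_template_from_run_dir_alt (dir_name : String) : Option String :=
  let parts := (PySem.Str.split? dir_name "_").getD []
  -- j0 = next((j for j in range(1, len(parts)) if parts[j].startswith(MODEL_PREFIXES)), None)
  match parts.tail.findIdx? (fun p => MODEL_PREFIXES.any (fun m => PySem.Str.startswith p m)) with
  | none => none
  | some k =>
    let j0 := k + 1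
    if (parts.drop (j0 + 1)).contains "regex" then
      some (PySem.Str.join "_" (parts.take j0))
    else none

-- ===== PRECONDITION & SPEC =====
def Spec_extract_template_from_run_dir (dir_name : String) (out : Option String) : Prop := out = extract_template_from_run_dir_alt dir_name
instance (dir_name : String) (out : Option String) : Decidable (Spec_extract_template_from_run_dir dir_name out) := by unfold Spec_extract_template_from_run_dir; infer_instance

-- ===== CLAIM (what is proved, stated in full; the proofs are below) =====
def Claim_equal_extract_template_from_run_dir : Prop := ∀ (dir_name : String), Dom_extract_template_from_run_dir dir_name → Spec_extract_template_from_run_dir dir_name (extract_template_from_run_dir dir_name)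

-- ===== LEMMAS AND PROOFS =====

-- `pvGood p` = p.startswith(MODEL_PREFIXES)
def pvGood (p : String) : Bool := MODEL_PREFIXES.any (fun m => PySem.Str.startswith p m)

-- no model prefix contains an underscore
theorem pvNoUnderscore : ∀ m ∈ MODEL_PREFIXES, '_' ∉ m.toList := by decide

theorem pvPrefixAppendUnderscore {m a b : List Char} (hm : '_' ∉ m) :
    m <+: a ++ '_' :: b ↔ m <+: a := by
  constructor
  · intro h
    rcases Nat.lt_or_ge a.length m.length with hlt | hge
    swap
    · exact List.prefix_of_prefix_length_le h (a.prefix_append ('_' :: b)) hge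
    · exfalso
      have ha : a <+: m := List.prefix_of_prefix_length_le (a.prefix_append ('_' :: b)) h (by omega)
      obtain ⟨m', rfl⟩ := ha
      have hm' : m' <+: '_' :: b := (List.prefix_append_right_inj a).mp h
      match m', hm' with
      | [], _ => simp at hlt
      | c :: t, h' =>
        have : c = '_' := by
          obtain ⟨r, hr⟩ := h'
          simpa using congrArg (fun l => l.head?) hr
        exact hm (by simp [this])
  · intro h
    exact h.trans (a.prefix_append _)

theorem pvGoodJoinCons (x : String) (rest : List String) :
    pvGood (PySem.Str.join "_" (x :: rest)) = pvGood x := by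
  unfold pvGood
  refine PySem.List.any_congr_mem ?_
  intro m hm
  have hmu : '_' ∉ m.toList := pvNoUnderscore m hm
  cases rest with
  | nil =>
    simp [PySem.Str.startswith_eq, PySem.Str.toList_join, PySem.Chars.join_singleton]
  | cons y t =>
    simp only [PySem.Str.startswith_eq, PySem.Str.toList_join, List.map_cons,
      PySem.Chars.join_cons_cons]
    have hu : ("_" : String).toList = ['_'] := rfl
    rw [hu]
    have : x.toList ++ ['_'] ++ PySem.Chars.join ['_'] (y.toList :: t.map String.toList)
        = x.toList ++ '_' :: PySem.Chars.join ['_'] (y.toList :: t.map String.toList) := by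
      rw [List.append_assoc]; rfl
    rw [this, Bool.eq_iff_iff]
    simp only [PySem.Chars.startswith_iff]
    exact pvPrefixAppendUnderscore hmu

-- the candidate test in A's inner loop is a test on the first token of the slice
theorem pvCandidate (parts : List String) (j i : Int) (h0 : 0 ≤ j) (hji : j < i)
    (hlen : j.toNat < parts.length) :
    (MODEL_PREFIXES.any (fun m =>
        PySem.Str.startswith (PySem.Str.join "_" (PySem.List.slice parts (some j) (some i))) m))
      = pvGood parts[j.toNat] := by
  have hi0 : 0 ≤ i := le_of_lt (lt_of_le_of_lt h0 hji)
  rw [PySem.List.slice_toNat parts h0 hi0]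
  have hdrop : parts.drop j.toNat = parts[j.toNat] :: parts.drop (j.toNat + 1) :=
    List.drop_eq_getElem_cons hlen
  obtain ⟨n, hn⟩ : ∃ n : Nat, i.toNat - j.toNat = n + 1 := ⟨i.toNat - j.toNat - 1, by omega⟩
  rw [hdrop, hn, List.take_succ_cons]
  exact pvGoodJoinCons _ _

theorem pvAbodyGood (parts : List String) (i j : Int) (h0 : 0 ≤ j) (hji : j < i)
    (hlen : j.toNat < parts.length) :
    pvAbody parts i j = if pvGood parts[j.toNat] then
        some (PySem.Str.join "_" (parts.take j.toNat)) else none := by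
  unfold pvAbody
  simp only
  rw [pvCandidate parts j i h0 hji hlen, PySem.List.slice_to parts h0]

theorem pvAinnerNone (parts : List String) (i : Int) (hi : i ≤ (parts.length : Int))
    (hng : ∀ t : Nat, 1 ≤ t → t < parts.length → (t : Int) < i → pvGood parts[t]! = false) :
    pvAinner parts i = none := by
  unfold pvAinner
  rw [List.findSome?_eq_none_iff]
  intro j hj
  have hj' := (PySem.List.mem_pyRange_one).mp hj
  have h0 : (0:Int) ≤ j := by omega
  have hlen : j.toNat < parts.length := by omega
  rw [pvAbodyGood parts i j h0 hj'.2 hlen]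
  have := hng j.toNat (by omega) hlen (by omega)
  rw [getElem!_pos parts j.toNat hlen] at this
  simp [this]

theorem pvAinnerHit (parts : List String) (i : Int) (j0 : Nat)
    (hj0 : 1 ≤ j0) (hj0len : j0 < parts.length) (hj0i : (j0 : Int) < i)
    (hg : pvGood parts[j0] = true)
    (hng : ∀ t : Nat, 1 ≤ t → t < j0 → pvGood parts[t]! = false) :
    pvAinner parts i = some (PySem.Str.join "_" (parts.take j0)) := by
  unfold pvAinner
  rw [PySem.List.pyRange_one_append 1 (j0 : Int) i (by omega) (by omega),
      PySem.List.pyRange_one_cons (by omega : (j0:Int) < i),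
      List.findSome?_append, List.findSome?_cons]
  have h1 : (PySem.List.pyRange 1 (j0:Int) 1).findSome? (pvAbody parts i) = none := by
    rw [List.findSome?_eq_none_iff]
    intro j hj
    have hj' := (PySem.List.mem_pyRange_one).mp hj
    have h0 : (0:Int) ≤ j := by omega
    have hlen : j.toNat < parts.length := by omega
    rw [pvAbodyGood parts i j h0 (by omega) hlen]
    have := hng j.toNat (by omega) (by omega)
    rw [getElem!_pos parts j.toNat hlen] at this
    simp [this]
  have h2 : pvAbody parts i (j0:Int) = some (PySem.Str.join "_" (parts.take j0)) := by
    rw [pvAbodyGood parts i (j0:Int) (by omega) hj0i (by simpa using hj0len)]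
    simp only [Int.toNat_natCast]
    rw [hg]
    simp
  rw [h1, h2]
  rfl

-- parts[u]! seen through a drop / through tail (index arithmetic kept in getElem?, where it is non-dependent)
theorem pvDropBang (parts : List String) (n u : Nat) (hu : n ≤ u) (hul : u < parts.length)
    (h1 : u - n < (parts.drop n).length) :
    (parts.drop n)[u - n] = parts[u]! := by
  have h2 : (parts.drop n)[u - n]? = some (parts[u]!) := by
    rw [List.getElem?_drop, show n + (u - n) = u from by omega,
        getElem!_pos parts u hul, List.getElem?_eq_getElem hul]
  rwa [List.getElem?_eq_getElem h1, Option.some_inj] at h2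

theorem pvTailBang (parts : List String) (t : Nat) (ht : 1 ≤ t) (htl : t < parts.length)
    (h1 : t - 1 < parts.tail.length) :
    parts.tail[t - 1] = parts[t]! := by
  have h2 : parts.tail[t - 1]? = some (parts[t]!) := by
    rw [← List.drop_one, List.getElem?_drop, show 1 + (t - 1) = t from by omega,
        getElem!_pos parts t htl, List.getElem?_eq_getElem htl]
  rwa [List.getElem?_eq_getElem h1, Option.some_inj] at h2

-- the heart of the file: A's nested scan equals B's single pass, for any token list
theorem pvMain (parts : List String) :
    (PySem.List.enumerate parts).findSome? (fun ip =>
        if ip.2 == "regex" then pvAinner parts ip.1 else none)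
      = match parts.tail.findIdx? (fun p => MODEL_PREFIXES.any (fun m => PySem.Str.startswith p m)) with
        | none => none
        | some k =>
          let j0 := k + 1
          if (parts.drop (j0 + 1)).contains "regex" then
            some (PySem.Str.join "_" (parts.take j0))
          else none := by
  have htail : parts.tail.findIdx? (fun p => MODEL_PREFIXES.any (fun m => PySem.Str.startswith p m))
      = parts.tail.findIdx? pvGood := rfl
  rw [htail]
  cases hf : parts.tail.findIdx? pvGood with
  | none =>
    have hno : ∀ t : Nat, 1 ≤ t → t < parts.length → pvGood parts[t]! = false := by
      intro t ht htlen
      have h1 : t - 1 < parts.tail.length := by simp [List.length_tail]; omega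
      rw [← pvTailBang parts t ht htlen h1]
      exact List.findIdx?_eq_none_iff.mp hf parts.tail[t-1] (List.getElem_mem h1)
    rw [List.findSome?_eq_none_iff]
    intro ip hip
    obtain ⟨k, hk, rfl⟩ := (PySem.List.mem_enumerate_iff parts 0 ip).mp hip
    simp only [zero_add]
    by_cases hreg : parts[k] == "regex"
    · rw [if_pos hreg]
      exact pvAinnerNone parts (k:Int) (by omega) (fun t ht htl hti => hno t ht htl)
    · rw [if_neg hreg]
  | some k =>
    obtain ⟨hk, hgk, hmin⟩ := List.findIdx?_eq_some_iff_getElem.mp hf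
    have hklen : k < parts.tail.length := hk
    have hlen : k + 1 < parts.length := by
      have := List.length_tail (l := parts); omega
    have hg : pvGood parts[k+1] = true := by
      rw [List.getElem_tail hk] at hgk; exact hgk
    have hng : ∀ t : Nat, 1 ≤ t → t < k + 1 → pvGood parts[t]! = false := by
      intro t ht htk
      have h1 : t - 1 < parts.tail.length := by omega
      rw [← pvTailBang parts t ht (by omega) h1]
      simpa using hmin (t-1) (by omega)
    simp only
    cases hr : (parts.drop (k + 1 + 1)).contains "regex" with
    | false =>
      simp only [Bool.false_eq_true, if_false]
      have hmem : "regex" ∉ parts.drop (k + 1 + 1) := by simpa using hr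
      have hnr : ∀ u : Nat, k + 1 + 1 ≤ u → u < parts.length → parts[u]! ≠ "regex" := by
        intro u hu hul hcon
        apply hmem
        have h1 : u - (k+1+1) < (parts.drop (k+1+1)).length := by simp [List.length_drop]; omega
        rw [← hcon, ← pvDropBang parts (k+1+1) u hu hul h1]
        exact List.getElem_mem h1
      rw [List.findSome?_eq_none_iff]
      intro ip hip
      obtain ⟨k', hk', rfl⟩ := (PySem.List.mem_enumerate_iff parts 0 ip).mp hip
      simp only [zero_add]
      by_cases hreg : parts[k'] == "regex"
      · rw [if_pos hreg]
        have hreg' : parts[k'] = "regex" := by simpa using hreg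
        have hk'le : k' ≤ k + 1 := by
          by_contra hcon
          exact hnr k' (by omega) hk' (by rw [getElem!_pos parts k' hk']; exact hreg')
        exact pvAinnerNone parts (k':Int) (by omega)
          (fun t ht htl hti => hng t ht (by omega))
      · rw [if_neg hreg]
    | true =>
      obtain ⟨t, ht⟩ : ∃ t, (parts.drop (k+1+1)).findIdx? (· == "regex") = some t := by
        cases h : (parts.drop (k+1+1)).findIdx? (· == "regex") with
        | some t => exact ⟨t, rfl⟩
        | none =>
          exfalso
          have hmem : "regex" ∈ parts.drop (k+1+1) := by simpa using hr
          have := List.findIdx?_eq_none_iff.mp h "regex" hmem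
          simp at this
      obtain ⟨htlen, htp, htmin⟩ := List.findIdx?_eq_some_iff_getElem.mp ht
      have histar : k + 1 + 1 + t < parts.length := by
        have hd : (parts.drop (k+1+1)).length = parts.length - (k+1+1) := List.length_drop; omega
      have hregstar : parts[k+1+1+t] = "regex" := by
        have := htp
        rw [List.getElem_drop] at this
        simpa using this
      have hminreg : ∀ u : Nat, k + 1 + 1 ≤ u → u < k + 1 + 1 + t → parts[u]! ≠ "regex" := by
        intro u hu hut hcon
        have h1 : u - (k+1+1) < (parts.drop (k+1+1)).length := by simp [List.length_drop]; omega
        have := htmin (u - (k+1+1)) (by omega)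
        rw [pvDropBang parts (k+1+1) u hu (by omega) h1] at this
        simp [hcon] at this
      -- split the outer enumeration at the first 'regex' index after k+1
      have hdecomp : PySem.List.enumerate parts 0
          = PySem.List.enumerate (parts.take (k+1+1+t)) 0
            ++ PySem.List.enumerate (parts.drop (k+1+1+t)) (k+1+1+t : Nat) := by
        conv_lhs => rw [← List.take_append_drop (k+1+1+t) parts]
        rw [PySem.List.enumerate_append, List.length_take,
            Nat.min_eq_left (by omega : k+1+1+t ≤ parts.length)]
        simp
      rw [hdecomp, List.findSome?_append]
      have hchunk1 : (PySem.List.enumerate (parts.take (k+1+1+t)) 0).findSome? (fun ip =>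
          if ip.2 == "regex" then pvAinner parts ip.1 else none) = none := by
        rw [List.findSome?_eq_none_iff]
        intro ip hip
        obtain ⟨k', hk', rfl⟩ := (PySem.List.mem_enumerate_iff _ 0 ip).mp hip
        have hk'lt : k' < k+1+1+t := by
          have := List.length_take_le (k+1+1+t) parts; omega
        have hk'len : k' < parts.length := by
          simp [List.length_take] at hk'; omega
        simp only [zero_add, List.getElem_take]
        by_cases hreg : parts[k'] == "regex"
        · rw [if_pos hreg]
          have hreg' : parts[k'] = "regex" := by simpa using hreg
          have hk'le : k' ≤ k + 1 := by
            by_contra hcon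
            exact hminreg k' (by omega) (by omega) (by rw [getElem!_pos parts k' hk'len]; exact hreg')
          exact pvAinnerNone parts (k':Int) (by omega)
            (fun t' ht' htl' hti' => hng t' ht' (by omega))
        · rw [if_neg hreg]
      have hchunk2 : parts.drop (k+1+1+t) = parts[k+1+1+t] :: parts.drop (k+1+1+t+1) :=
        List.drop_eq_getElem_cons histar
      rw [hchunk1, Option.none_or, hchunk2, PySem.List.enumerate_cons, List.findSome?_cons]
      have hhit : pvAinner parts ((k+1+1+t : Nat) : Int)
          = some (PySem.Str.join "_" (parts.take (k+1))) :=
        pvAinnerHit parts _ (k+1) (by omega) hlen (by push_cast; omega) hg hng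
      rw [hregstar]
      simp only [beq_self_eq_true, if_pos]
      rw [hhit]

-- ===== VERDICT (by name: the statement is the Claim_ definition above) =====
theorem extract_template_from_run_dir_spec : Claim_equal_extract_template_from_run_dir := by
  intro dir_name _
  unfold Spec_extract_template_from_run_dir extract_template_from_run_dir extract_template_from_run_dir_alt
  exact pvMain _
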